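-- pv_equiv track=rewrite | github.com/MutaharAliKhan/automation | testinggg.py | reconstruct_code_with_comments
-- ===== SOURCE A (Python) =====
-- def reconstruct_code_with_comments(original_code, comments, transformed_code):
--     transformed_lines = transformed_code.splitlines(keepends=True)
--     original_lines = original_code.splitlines(keepends=True)
--
--     comment_map = {i: [] for i in range(len(transformed_lines))}
--     for line_number, comment in comments.items():
--         if 0 <= line_number < len(transformed_lines):
--             comment_map[line_number].append(comment)
--
--     output_lines = []
--     for i, line in enumerate(transformed_lines):
--         output_lines.append(line)
--         if i in comment_map:
--             for comment in comment_map[i]: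
--                 output_lines.append(comment)
--
--     # Add any remaining comments that are not included in the transformed code
--     for i in range(len(transformed_lines), len(original_lines)):
--         if i in comments:
--             output_lines.append(comments[i])
--
--     return ''.join(output_lines)
-- ===== SOURCE B (Python) =====
-- def reconstruct_code_with_comments(original_code, comments, transformed_code):
--     tl = transformed_code.splitlines(keepends=True)
--     n = max(len(tl), len(original_code.splitlines(keepends=True)))
--     items = sorted((kc for kc in comments.items() if 0 <= kc[0] < n),
--                    key=lambda kc: kc[0])
--     parts = []
--     prev = 0
--     for k, c in items:
--         parts.extend(tl[prev:k + 1])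
--         parts.append(c)
--         prev = k + 1
--     parts.extend(tl[prev:])
--     return ''.join(parts)
-- ===== Notes on version B (the rewrite author's own statement) =====
-- stated objective: alternative
-- what changed: B replaces A's index-dict (comment_map) and its two shaped passes by a sort-then-merge: the in-range comment items are sorted by line number and a single merge loop emits the slice of transformed lines up to each comment's index followed by the comment, then the remaining lines.
import Mathlib
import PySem

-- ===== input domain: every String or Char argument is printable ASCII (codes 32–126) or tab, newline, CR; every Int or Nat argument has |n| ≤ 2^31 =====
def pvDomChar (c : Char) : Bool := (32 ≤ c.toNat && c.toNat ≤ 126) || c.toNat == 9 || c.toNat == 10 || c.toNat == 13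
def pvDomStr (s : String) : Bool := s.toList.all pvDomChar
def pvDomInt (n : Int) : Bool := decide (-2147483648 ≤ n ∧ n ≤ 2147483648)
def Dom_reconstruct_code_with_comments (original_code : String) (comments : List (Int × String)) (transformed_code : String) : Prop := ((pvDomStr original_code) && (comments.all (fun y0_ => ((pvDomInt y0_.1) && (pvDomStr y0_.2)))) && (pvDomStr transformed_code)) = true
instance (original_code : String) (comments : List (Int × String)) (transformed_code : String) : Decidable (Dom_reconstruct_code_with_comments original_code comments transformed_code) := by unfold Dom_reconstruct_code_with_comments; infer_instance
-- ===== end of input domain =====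

-- B replaces A's index dict + two shaped passes by sort-the-comments-then-merge-with-slices;
-- objective: alternative (same order of cost).
-- PySem has no splitlines(keepends=True), so it is ported by hand: pvSplitKeep is exact for
-- strings whose characters are printable ASCII, tab, '\n' or '\r' (all of Dom), where the
-- only Python line boundaries are '\n', '\r' and '\r\n'.

-- ===== PORT A =====
def pvSplitKeep : List Char → List Char → List (List Char)
  | [], acc => if acc.isEmpty then [] else [acc.reverse]
  | '\r' :: '\n' :: rest, acc => (acc.reverse ++ ['\r', '\n']) :: pvSplitKeep rest []
  | '\r' :: rest, acc => (acc.reverse ++ ['\r']) :: pvSplitKeep rest []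
  | '\n' :: rest, acc => (acc.reverse ++ ['\n']) :: pvSplitKeep rest []
  | c :: rest, acc => pvSplitKeep rest (c :: acc)

-- s.splitlines(keepends=True) (exact on Dom's character set)
def pvLinesKeep (s : String) : List (List Char) := pvSplitKeep s.toList []

-- {i: [] for i in range(len(transformed_lines))}
def pvInitMap (T : Int) : PySem.Dict Int (List (List Char)) :=
  (PySem.List.pyRange 0 T 1).foldl (fun d i => d.insert i []) PySem.Dict.empty

-- the loop 'for line_number, comment in comments.items(): …'
def pvCommentMap (comments : List (Int × String)) (T : Int) : PySem.Dict Int (List (List Char)) :=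
  comments.foldl
    (fun d kc => if 0 ≤ kc.1 ∧ kc.1 < T then d.modify kc.1 [] (· ++ [kc.2.toList]) else d)
    (pvInitMap T)

def reconstruct_code_with_comments (original_code : String) (comments : List (Int × String)) (transformed_code : String) : String :=
  let transformed_lines := pvLinesKeep transformed_code
  let original_lines := pvLinesKeep original_code
  let comment_map := pvCommentMap comments (transformed_lines.length : Int)
  let output_lines :=
    (PySem.List.enumerate transformed_lines).foldl
      (fun acc il =>
        let acc := acc ++ [il.2]
        if comment_map.contains il.1 then
          match comment_map.get? il.1 with
          | some cs => acc ++ cs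
          | none => acc
        else acc) []
  let output_lines :=
    (PySem.List.pyRange (transformed_lines.length : Int) (original_lines.length : Int) 1).foldl
      (fun acc i =>
        match List.lookup i comments with
        | some c => acc ++ [c.toList]
        | none => acc) output_lines
  String.mk (PySem.Chars.join [] output_lines)

-- ===== PORT B =====
def reconstruct_code_with_comments_alt (original_code : String) (comments : List (Int × String)) (transformed_code : String) : String :=
  let tl := pvLinesKeep transformed_code
  let n : Int := max (tl.length : Int) ((pvLinesKeep original_code).length : Int)
  let items := PySem.List.sorted
    (comments.filter (fun kc => decide (0 ≤ kc.1 ∧ kc.1 < n))) (fun kc => kc.1) false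
  let st := items.foldl
    (fun (st : List (List Char) × Int) kc =>
      (st.1 ++ PySem.List.slice tl (some st.2) (some (kc.1 + 1)) ++ [kc.2.toList], kc.1 + 1))
    ([], 0)
  String.mk (PySem.Chars.join [] (st.1 ++ PySem.List.slice tl (some st.2) none))

-- ===== PRECONDITION & SPEC =====
-- Pre_ only states the representation invariant of the Python dict 'comments': its
-- association-list image has pairwise-distinct keys (a Python dict cannot have duplicates),
-- so no input A accepts is excluded.
def Pre_reconstruct_code_with_comments (original_code : String) (comments : List (Int × String)) (transformed_code : String) : Prop :=
  (comments.map Prod.fst).Nodup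
instance (original_code : String) (comments : List (Int × String)) (transformed_code : String) : Decidable (Pre_reconstruct_code_with_comments original_code comments transformed_code) := by unfold Pre_reconstruct_code_with_comments; infer_instance

def pvWitness_reconstruct_code_with_comments : String × (List (Int × String)) × String :=
  ("x = 1\ny = 2\n", [((0 : Int), "# zero\n"), ((3 : Int), "# three\n")], "a = x\nb = y\nc = a\n")

def Spec_reconstruct_code_with_comments (original_code : String) (comments : List (Int × String)) (transformed_code : String) (out : String) : Prop := out = reconstruct_code_with_comments_alt original_code comments transformed_code
instance (original_code : String) (comments : List (Int × String)) (transformed_code : String) (out : String) : Decidable (Spec_reconstruct_code_with_comments original_code comments transformed_code out) := by unfold Spec_reconstruct_code_with_comments; infer_instance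

-- ===== CLAIM (what is proved, stated in full; the proofs are below) =====
def Claim_equal_reconstruct_code_with_comments : Prop := ∀ (original_code : String) (comments : List (Int × String)) (transformed_code : String), Dom_reconstruct_code_with_comments original_code comments transformed_code → Pre_reconstruct_code_with_comments original_code comments transformed_code → Spec_reconstruct_code_with_comments original_code comments transformed_code (reconstruct_code_with_comments original_code comments transformed_code)

-- ===== LEMMAS AND PROOFS =====

-- the single comment (as a one- or zero-element list of lines) attached to index i
def pvLookupPart (comments : List (Int × String)) (i : Int) : List (List Char) :=
  match List.lookup i comments with
  | some c => [c.toList]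
  | none => []

-- the canonical per-index contribution both programs realise
def pvLine (tl : List (List Char)) (i : Int) : List (List Char) :=
  if i < (tl.length : Int) then [PySem.List.pyGetD tl i []] else []

def pvStep (comments : List (Int × String)) (tl : List (List Char)) (i : Int) : List (List Char) :=
  pvLine tl i ++ pvLookupPart comments i

theorem pvInitMap_get (n : Nat) : ∀ (a : Int) (d : PySem.Dict Int (List (List Char))) (i : Int),
    ((PySem.List.pyRange a (a + n) 1).foldl (fun d j => d.insert j []) d).get? i
      = if a ≤ i ∧ i < a + n then some [] else d.get? i := by
  induction n with
  | zero =>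
    intro a d i
    rw [PySem.List.pyRange_one_eq_nil (by omega)]
    simp only [List.foldl_nil]
    rw [if_neg (by omega)]
  | succ n ih =>
    intro a d i
    rw [PySem.List.pyRange_one_cons (by omega), List.foldl_cons]
    have h1 : a + ((n : Int) + 1) = (a + 1) + (n : Int) := by ring
    rw [show ((n + 1 : Nat) : Int) = (n : Int) + 1 by push_cast; ring, h1, ih (a + 1)]
    rw [PySem.Dict.get?_insert]
    split_ifs with h2 h3 h4 <;> first | rfl | omega

theorem pvCommentMap_untouched (comments : List (Int × String)) (T : Int) :
    ∀ (d : PySem.Dict Int (List (List Char))) (i : Int), i ∉ comments.map Prod.fst →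
    (comments.foldl
      (fun d kc => if 0 ≤ kc.1 ∧ kc.1 < T then d.modify kc.1 [] (· ++ [kc.2.toList]) else d)
      d).get? i = d.get? i := by
  induction comments with
  | nil => intro d i _; rfl
  | cons kc rest ih =>
    intro d i hi
    simp only [List.map_cons, List.mem_cons, not_or] at hi
    rw [List.foldl_cons, ih _ _ hi.2]
    split_ifs with h
    · simp only [PySem.Dict.modify]
      exact PySem.Dict.get?_insert_of_ne _ _ hi.1
    · rfl

theorem pvCommentMap_get (T : Int) :
    ∀ (comments : List (Int × String)) (d : PySem.Dict Int (List (List Char))) (i : Int),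
    (comments.map Prod.fst).Nodup → 0 ≤ i → i < T → d.get? i = some [] →
    (comments.foldl
      (fun d kc => if 0 ≤ kc.1 ∧ kc.1 < T then d.modify kc.1 [] (· ++ [kc.2.toList]) else d)
      d).get? i = some (pvLookupPart comments i) := by
  intro comments
  induction comments with
  | nil => intro d i _ _ _ hd; simpa [pvLookupPart, List.lookup] using hd
  | cons kc rest ih =>
    intro d i hnd h0 hT hd
    simp only [List.map_cons, List.nodup_cons] at hnd
    rw [List.foldl_cons]
    by_cases hik : i = kc.1
    · subst hik
      rw [if_pos ⟨h0, hT⟩]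
      rw [pvCommentMap_untouched rest T _ _ hnd.1]
      simp only [PySem.Dict.modify]
      rw [PySem.Dict.getD_eq_get?_getD, hd, PySem.Dict.get?_insert_self]
      simp [pvLookupPart, List.lookup]
    · have step : ∀ (d' : PySem.Dict Int (List (List Char))),
        ((if 0 ≤ kc.1 ∧ kc.1 < T then d'.modify kc.1 [] (· ++ [kc.2.toList]) else d')).get? i
          = d'.get? i := by
        intro d'; split_ifs with h
        · simp only [PySem.Dict.modify]
          exact PySem.Dict.get?_insert_of_ne _ _ hik
        · rfl
      rw [ih _ _ hnd.2 h0 hT (by rw [step d, hd])]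
      have : List.lookup i (kc :: rest) = List.lookup i rest := by
        rcases kc with ⟨k, c⟩
        simp only [List.lookup]
        have : (i == k) = false := by simpa using hik
        rw [this]
      simp [pvLookupPart, this]

-- A's output_lines equal the canonical flatMap over range(0, max(T, O))
theorem pvAEq (comments : List (Int × String)) (hpre : (comments.map Prod.fst).Nodup)
    (tl ol : List (List Char)) :
    (PySem.List.pyRange (tl.length : Int) (ol.length : Int) 1).foldl
      (fun acc i => match List.lookup i comments with
        | some c => acc ++ [c.toList] | none => acc)
      ((PySem.List.enumerate tl).foldl
        (fun acc il =>
          let acc := acc ++ [il.2]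
          if (pvCommentMap comments (tl.length : Int)).contains il.1 then
            match (pvCommentMap comments (tl.length : Int)).get? il.1 with
            | some cs => acc ++ cs | none => acc
          else acc) [])
    = (PySem.List.pyRange 0 (max (tl.length : Int) (ol.length : Int)) 1).flatMap
        (pvStep comments tl) := by
  have hT0 : (0 : Int) ≤ (tl.length : Int) := by positivity
  have cmget : ∀ i : Int, 0 ≤ i → i < (tl.length : Int) →
      (pvCommentMap comments (tl.length : Int)).get? i = some (pvLookupPart comments i) := by
    intro i h0 hT
    unfold pvCommentMap
    apply pvCommentMap_get _ _ _ _ hpre h0 hT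
    unfold pvInitMap
    have hn : (tl.length : Int) = 0 + ((tl.length : Nat) : Int) := by omega
    rw [hn, pvInitMap_get tl.length 0]
    rw [if_pos (by constructor <;> omega)]
  have hA2 : (fun (acc : List (List Char)) (i : Int) => match List.lookup i comments with
        | some c => acc ++ [c.toList] | none => acc)
      = fun acc i => acc ++ pvLookupPart comments i := by
    funext acc i
    unfold pvLookupPart
    cases List.lookup i comments <;> simp
  rw [hA2, PySem.List.foldl_append_eq_flatMap]
  rw [PySem.List.pyRange_one_append 0 (tl.length : Int) (max (tl.length : Int) (ol.length : Int))
    hT0 (le_max_left _ _), List.flatMap_append]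
  congr 1
  · -- A's first pass = the canonical flatMap on the indices below len(transformed_lines)
    rw [PySem.List.enumerate_eq_map_pyRange tl [], List.foldl_map]
    dsimp only
    rw [PySem.List.foldl_congr_mem _ _
      (fun (acc : List (List Char)) (j : Int) => acc ++ pvStep comments tl j) _ ?_]
    · rw [PySem.List.foldl_append_eq_flatMap, List.nil_append, PySem.List.len_eq]
    · intro acc j hj
      rw [PySem.List.len_eq, PySem.List.mem_pyRange_one] at hj
      have hg := cmget j hj.1 hj.2
      rw [PySem.Dict.contains_eq_isSome_get?, hg]
      simp [pvStep, pvLine, hj.2, List.append_assoc]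
  · -- remaining indices: the comments at [len(transformed), max)
    by_cases hOT : (ol.length : Int) ≤ (tl.length : Int)
    · rw [PySem.List.pyRange_one_eq_nil hOT, max_eq_left hOT,
        PySem.List.pyRange_one_eq_nil le_rfl]
      rfl
    · rw [max_eq_right (le_of_not_ge hOT)]
      rw [List.flatMap_def, List.flatMap_def, List.map_congr_left]
      intro j hj
      rw [PySem.List.mem_pyRange_one] at hj
      simp [pvStep, pvLine, if_neg (by omega : ¬ j < (tl.length : Int))]

-- lookup in an association list is none iff the key is absent
theorem pvLookupNone (j : Int) : ∀ (l : List (Int × String)),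
    j ∉ l.map Prod.fst → List.lookup j l = none := by
  intro l
  induction l with
  | nil => intro _; rfl
  | cons kc rest ih =>
    intro h
    simp only [List.map_cons, List.mem_cons, not_or] at h
    simp only [List.lookup]
    rw [show (j == kc.1) = false by simpa using h.1]
    exact ih h.2

-- with distinct keys, lookup is membership
theorem pvLookupSomeIff (j : Int) (c : String) : ∀ (l : List (Int × String)),
    (l.map Prod.fst).Nodup → (List.lookup j l = some c ↔ (j, c) ∈ l) := by
  intro l
  induction l with
  | nil => intro _; simp [List.lookup]
  | cons kc rest ih =>
    intro hnd
    simp only [List.map_cons, List.nodup_cons] at hnd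
    by_cases hjk : j = kc.1
    · subst hjk
      simp only [List.lookup, beq_self_eq_true, List.mem_cons]
      constructor
      · rintro h; left; cases kc; simpa using h.symm
      · rintro (h | h)
        · cases kc; simp at h; simp [h]
        · exact absurd (List.mem_map.mpr ⟨(kc.1, c), h, rfl⟩) hnd.1
    · simp only [List.lookup, show (j == kc.1) = false by simpa using hjk, List.mem_cons]
      rw [ih hnd.2]
      constructor
      · exact Or.inr
      · rintro (h | h)
        · exact absurd (congrArg Prod.fst h) hjk
        · exact h

-- lookup with distinct keys is stable under permutation
theorem pvLookupPerm (l l' : List (Int × String)) (hnd : (l.map Prod.fst).Nodup)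
    (hp : l.Perm l') (j : Int) : List.lookup j l = List.lookup j l' := by
  have hnd' : (l'.map Prod.fst).Nodup := ((hp.map Prod.fst).nodup_iff).mp hnd
  cases h : List.lookup j l' with
  | some c =>
    exact (pvLookupSomeIff j c l hnd).mpr (hp.mem_iff.mpr ((pvLookupSomeIff j c l' hnd').mp h))
  | none =>
    apply pvLookupNone
    intro hm
    rcases List.mem_map.mp hm with ⟨p, hpmem, hpj⟩
    have : List.lookup j l' = some p.2 := by
      apply (pvLookupSomeIff j p.2 l' hnd').mpr
      rw [show (j, p.2) = p by cases p; simp_all]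
      exact hp.mem_iff.mp hpmem
    rw [h] at this; cases this

-- filtering by an index-range predicate preserves lookup inside the range
theorem pvLookupFilter (lo hi j : Int) (h0 : lo ≤ j) (hj : j < hi) :
    ∀ (l : List (Int × String)),
    List.lookup j (l.filter (fun kc => decide (lo ≤ kc.1 ∧ kc.1 < hi))) = List.lookup j l := by
  intro l
  induction l with
  | nil => rfl
  | cons kc rest ih =>
    by_cases hjk : j = kc.1
    · subst hjk
      rw [List.filter_cons_of_pos (by simp [h0, hj])]
      simp [List.lookup]
    · have hb : (j == kc.1) = false := by simpa using hjk
      by_cases hk : lo ≤ kc.1 ∧ kc.1 < hi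
      · rw [List.filter_cons_of_pos (by simpa using hk)]
        simp only [List.lookup, hb]
        exact ih
      · rw [List.filter_cons_of_neg (by simpa using hk)]
        simp only [List.lookup, hb]
        exact ih

-- the lines of indices [a, a+n) are a drop/take of the line list
theorem pvLinesSeg (tl : List (List Char)) : ∀ (n : Nat) (a : Int), 0 ≤ a →
    (PySem.List.pyRange a (a + n) 1).flatMap (pvLine tl)
      = (tl.drop a.toNat).take n := by
  intro n
  induction n with
  | zero =>
    intro a _
    rw [show a + ((0 : Nat) : Int) = a by push_cast; ring, PySem.List.pyRange_one_eq_nil le_rfl]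
    simp
  | succ n ih =>
    intro a ha
    rw [PySem.List.pyRange_one_cons (by push_cast; omega), List.flatMap_cons]
    rw [show a + ((n + 1 : Nat) : Int) = (a + 1) + (n : Int) by push_cast; ring, ih (a + 1) (by omega)]
    by_cases hlt : a < (tl.length : Int)
    · rw [pvLine, if_pos hlt, PySem.List.pyGetD_of_nonneg tl [] ha]
      have hd : List.drop a.toNat tl = tl[a.toNat] :: List.drop (a.toNat + 1) tl :=
        List.drop_eq_getElem_cons (by omega)
      rw [show (a + 1).toNat = a.toNat + 1 by omega,
        List.getD_eq_getElem tl [] (show a.toNat < tl.length by omega), hd, List.take_succ_cons]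
      rfl
    · rw [pvLine, if_neg hlt]
      rw [List.drop_eq_nil_of_le (by omega), List.drop_eq_nil_of_le (by omega)]
      simp

-- B's merge loop realises the canonical flatMap over [prev, hi)
theorem pvMerge (comments : List (Int × String)) (tl : List (List Char)) (hi : Int)
    (hThi : (tl.length : Int) ≤ hi) :
    ∀ (its : List (Int × String)) (acc : List (List Char)) (prev : Int),
    0 ≤ prev → prev ≤ hi →
    its.Pairwise (fun p q => p.1 < q.1) →
    (∀ p ∈ its, prev ≤ p.1 ∧ p.1 < hi) →
    (∀ j : Int, prev ≤ j → j < hi → List.lookup j comments = List.lookup j its) →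
    (its.foldl
        (fun (st : List (List Char) × Int) kc =>
          (st.1 ++ PySem.List.slice tl (some st.2) (some (kc.1 + 1)) ++ [kc.2.toList], kc.1 + 1))
        (acc, prev)).1
      ++ PySem.List.slice tl (some ((its.foldl
        (fun (st : List (List Char) × Int) kc =>
          (st.1 ++ PySem.List.slice tl (some st.2) (some (kc.1 + 1)) ++ [kc.2.toList], kc.1 + 1))
        (acc, prev)).2)) none
      = acc ++ (PySem.List.pyRange prev hi 1).flatMap (pvStep comments tl) := by
  intro its
  induction its with
  | nil =>
    intro acc prev h0 hph _ _ hlk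
    simp only [List.foldl_nil]
    rw [PySem.List.slice_from tl h0]
    have hstep : ∀ j ∈ PySem.List.pyRange prev hi 1, pvStep comments tl j = pvLine tl j := by
      intro j hj
      rw [PySem.List.mem_pyRange_one] at hj
      have hl := hlk j hj.1 hj.2
      simp only [List.lookup] at hl
      simp [pvStep, pvLookupPart, hl]
    rw [List.flatMap_def, List.map_congr_left hstep, ← List.flatMap_def]
    have hseg := pvLinesSeg tl (hi - prev).toNat prev h0
    rw [show prev + (((hi - prev).toNat : Nat) : Int) = hi by omega] at hseg
    rw [hseg, List.take_of_length_le (by rw [List.length_drop]; omega)]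
  | cons kc rest ih =>
    intro acc prev h0 hph hpw hk hlk
    have hkk := hk kc (List.mem_cons_self)
    have hpc := List.pairwise_cons.mp hpw
    rw [List.foldl_cons]
    rw [ih (acc ++ PySem.List.slice tl (some prev) (some (kc.1 + 1)) ++ [kc.2.toList])
      (kc.1 + 1) (by omega) (by omega) hpc.2
      (by
        intro p hp
        have h1 := hk p (List.mem_cons_of_mem _ hp)
        have h2 := hpc.1 p hp
        exact ⟨by omega, h1.2⟩)
      (by
        intro j hj1 hj2
        rw [hlk j (by omega) hj2]
        simp only [List.lookup]
        rw [show (j == kc.1) = false by simp; omega])]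
    have hstepN : ∀ j ∈ PySem.List.pyRange prev kc.1 1, pvStep comments tl j = pvLine tl j := by
      intro j hj
      rw [PySem.List.mem_pyRange_one] at hj
      have hl := hlk j hj.1 (by omega)
      simp only [List.lookup] at hl
      rw [show (j == kc.1) = false by simp; omega] at hl
      have hnone : List.lookup j rest = none := by
        apply pvLookupNone
        intro hm
        rcases List.mem_map.mp hm with ⟨p, hpmem, hpj⟩
        have := hpc.1 p hpmem
        omega
      rw [hnone] at hl
      simp [pvStep, pvLookupPart, hl]
    have hseg1 : (PySem.List.pyRange prev kc.1 1).flatMap (pvStep comments tl)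
        = List.take (kc.1 - prev).toNat (List.drop prev.toNat tl) := by
      rw [List.flatMap_def, List.map_congr_left hstepN, ← List.flatMap_def]
      have hseg := pvLinesSeg tl (kc.1 - prev).toNat prev h0
      rw [show prev + (((kc.1 - prev).toNat : Nat) : Int) = kc.1 by omega] at hseg
      exact hseg
    have hlc : List.lookup kc.1 comments = some kc.2 := by
      rw [hlk kc.1 hkk.1 hkk.2]
      simp [List.lookup]
    have hseg2 : (PySem.List.pyRange kc.1 (kc.1 + 1) 1).flatMap (pvStep comments tl)
        = pvLine tl kc.1 ++ [kc.2.toList] := by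
      rw [PySem.List.pyRange_one_singleton]
      simp [pvStep, pvLookupPart, hlc]
    have hslice : PySem.List.slice tl (some prev) (some (kc.1 + 1))
        = List.take (kc.1 - prev).toNat (List.drop prev.toNat tl) ++ pvLine tl kc.1 := by
      have hA := pvLinesSeg tl (kc.1 + 1 - prev).toNat prev h0
      rw [show prev + (((kc.1 + 1 - prev).toNat : Nat) : Int) = kc.1 + 1 by omega] at hA
      rw [PySem.List.pyRange_one_append prev kc.1 (kc.1 + 1) (by omega) (by omega),
        List.flatMap_append] at hA
      have hB := pvLinesSeg tl (kc.1 - prev).toNat prev h0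
      rw [show prev + (((kc.1 - prev).toNat : Nat) : Int) = kc.1 by omega] at hB
      rw [hB, PySem.List.pyRange_one_singleton] at hA
      simp only [List.flatMap_cons, List.flatMap_nil, List.append_nil] at hA
      rw [PySem.List.slice_toNat tl h0 (by omega),
        show (kc.1 + 1).toNat - prev.toNat = (kc.1 + 1 - prev).toNat by omega]
      exact hA.symm
    rw [PySem.List.pyRange_one_append prev (kc.1 + 1) hi (by omega) (by omega),
      List.flatMap_append,
      PySem.List.pyRange_one_append prev kc.1 (kc.1 + 1) (by omega) (by omega),
      List.flatMap_append, hseg1, hseg2, hslice]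
    simp [List.append_assoc]

-- ===== VERDICT (by name: the statement is the Claim_ definition above) =====
theorem reconstruct_code_with_comments_spec : Claim_equal_reconstruct_code_with_comments := by
  intro original_code comments transformed_code _hdom hpre
  unfold Spec_reconstruct_code_with_comments reconstruct_code_with_comments
    reconstruct_code_with_comments_alt
  apply congrArg (fun l => String.mk (PySem.Chars.join [] l))
  have hT0 : (0 : Int) ≤ ((pvLinesKeep transformed_code).length : Int) := by positivity
  set tl := pvLinesKeep transformed_code with htl
  set ol := pvLinesKeep original_code with hol
  set n : Int := max (tl.length : Int) (ol.length : Int) with hn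
  have hfsub : ((comments.filter (fun kc => decide (0 ≤ kc.1 ∧ kc.1 < n))).map Prod.fst).Nodup :=
    ((List.filter_sublist (l := comments)).map Prod.fst).nodup hpre
  have hperm : (comments.filter (fun kc => decide (0 ≤ kc.1 ∧ kc.1 < n))).Perm
      (PySem.List.sorted (comments.filter (fun kc => decide (0 ≤ kc.1 ∧ kc.1 < n)))
        (fun kc => kc.1) false) :=
    (PySem.List.sorted_perm _ _ _).symm
  have hnds : ((PySem.List.sorted (comments.filter (fun kc => decide (0 ≤ kc.1 ∧ kc.1 < n)))
      (fun kc => kc.1) false).map Prod.fst).Nodup :=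
    ((hperm.map Prod.fst).nodup_iff).mp hfsub
  have hlt : (PySem.List.sorted (comments.filter (fun kc => decide (0 ≤ kc.1 ∧ kc.1 < n)))
      (fun kc => kc.1) false).Pairwise (fun p q => p.1 < q.1) := by
    have h1 := PySem.List.sorted_pairwise
      (comments.filter (fun kc => decide (0 ≤ kc.1 ∧ kc.1 < n))) (fun kc => kc.1)
    have h2 : (PySem.List.sorted (comments.filter (fun kc => decide (0 ≤ kc.1 ∧ kc.1 < n)))
        (fun kc => kc.1) false).Pairwise (fun p q => p.1 ≠ q.1) :=
      List.pairwise_map.mp hnds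
    exact (h1.and h2).imp (fun h => lt_of_le_of_ne h.1 h.2)
  have hmerge := pvMerge comments tl n (le_max_left _ _)
    (PySem.List.sorted (comments.filter (fun kc => decide (0 ≤ kc.1 ∧ kc.1 < n)))
      (fun kc => kc.1) false)
    [] 0 le_rfl (le_trans hT0 (le_max_left _ _)) hlt
    (by
      intro p hp
      have hm : p ∈ comments.filter (fun kc => decide (0 ≤ kc.1 ∧ kc.1 < n)) :=
        (PySem.List.mem_sorted _ _ _ _).mp hp
      have := (List.mem_filter.mp hm).2
      simp only [decide_eq_true_eq] at this
      exact ⟨this.1, this.2⟩)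
    (by
      intro j hj1 hj2
      rw [← pvLookupFilter 0 n j hj1 hj2 comments]
      exact pvLookupPerm _ _ hfsub hperm j)
  rw [List.nil_append] at hmerge
  exact (pvAEq comments hpre tl ol).trans hmerge.symm
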